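-- pv_equiv track=rewrite | github.com/werry216/rust | src/libcore/unicode/unicode.py | compute_trie
-- ===== SOURCE A (Python) =====
-- def compute_trie(raw_data, chunk_size):
--     # type: (List[int], int) -> Tuple[List[int], List[int]]
--     """
--     Compute postfix-compressed trie.
--
--     See: bool_trie.rs for more details.
--
--     >>> compute_trie([1, 2, 3, 1, 2, 3, 4, 5, 6], 3)
--     ([0, 0, 1], [1, 2, 3, 4, 5, 6])
--     >>> compute_trie([1, 2, 3, 1, 2, 4, 4, 5, 6], 3)
--     ([0, 1, 2], [1, 2, 3, 1, 2, 4, 4, 5, 6])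
--     """
--     root = []
--     childmap = {}       # type: Dict[Tuple[int, ...], int]
--     child_data = []
--
--     assert len(raw_data) % chunk_size == 0, "Chunks must be equally sized"
--
--     for i in range(len(raw_data) // chunk_size):
--         data = raw_data[i * chunk_size : (i + 1) * chunk_size]
--
--         # postfix compression of child nodes (data chunks)
--         # (identical child nodes are shared)
--
--         # make a tuple out of the list so it's hashable
--         child = tuple(data)
--         if child not in childmap:
--             childmap[child] = len(childmap)
--             child_data.extend(data)
--
--         root.append(childmap[child])
--
--     return root, child_data
-- ===== SOURCE B (Python) =====
-- def compute_trie(raw_data, chunk_size):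
--     # type: (List[int], int) -> Tuple[List[int], List[int]]
--     assert len(raw_data) % chunk_size == 0, "Chunks must be equally sized"
--     n = len(raw_data) // chunk_size
--     chunks = [tuple(raw_data[i * chunk_size:(i + 1) * chunk_size]) for i in range(n)]
--     # a chunk's id = number of distinct chunks first seen strictly before its
--     # first occurrence; characterised via first-occurrence positions, no dict.
--     first = [chunks.index(ch) for ch in chunks]
--     isfirst = [f == i for i, f in enumerate(first)]
--     root = [isfirst[:f].count(True) for f in first]
--     child_data = [x for ch, b in zip(chunks, isfirst) if b for x in ch]
--     return root, child_data
-- ===== Notes on version B (the rewrite author's own statement) =====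
-- stated objective: alternative
-- what changed: B drops A's dict-and-accumulator loop entirely and characterises each chunk's id statelessly: it computes every chunk's first-occurrence position with list.index, marks first occurrences, and derives each id as the count of first occurrences before that position (root) and child_data as the chunks at first-occurrence positions.
import Mathlib
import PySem

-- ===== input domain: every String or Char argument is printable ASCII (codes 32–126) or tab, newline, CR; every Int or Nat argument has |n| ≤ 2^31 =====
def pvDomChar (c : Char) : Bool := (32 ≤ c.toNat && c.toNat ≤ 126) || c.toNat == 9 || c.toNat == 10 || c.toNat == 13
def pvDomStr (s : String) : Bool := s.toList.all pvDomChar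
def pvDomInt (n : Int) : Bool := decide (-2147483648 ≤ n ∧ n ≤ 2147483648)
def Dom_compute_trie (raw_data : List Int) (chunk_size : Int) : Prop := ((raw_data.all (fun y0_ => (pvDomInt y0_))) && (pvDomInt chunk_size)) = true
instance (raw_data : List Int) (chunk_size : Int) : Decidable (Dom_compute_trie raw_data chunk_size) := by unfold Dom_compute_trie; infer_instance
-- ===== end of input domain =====

-- B replaces A's dict-based one-pass dedup by a stateless characterisation via
-- first-occurrence positions (list.index + prefix counts of firsts); alternative algorithm.


-- ===== PORT A =====
-- one loop iteration of A: state (root, childmap, child_data)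
def ctStepA (raw_data : List Int) (chunk_size : Int)
    (st : List Int × PySem.Dict (List Int) Int × List Int) (i : Int) :
    List Int × PySem.Dict (List Int) Int × List Int :=
  let data := PySem.List.slice raw_data (some (i * chunk_size)) (some ((i + 1) * chunk_size))
  let root := st.1
  let childmap := st.2.1
  let child_data := st.2.2
  let (childmap, child_data) :=
    if childmap.contains data then (childmap, child_data)
    else (childmap.insert data (childmap.size : Int), child_data ++ data)
  (root ++ [childmap.getD data 0], childmap, child_data)

def compute_trie (raw_data : List Int) (chunk_size : Int) : List Int × List Int :=
  let n := PySem.Int.floordiv (raw_data.length : Int) chunk_size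
  let st := (PySem.List.pyRange 0 n 1).foldl (ctStepA raw_data chunk_size)
      ([], PySem.Dict.empty, [])
  (st.1, st.2.2)

-- ===== PORT B =====
def compute_trie_alt (raw_data : List Int) (chunk_size : Int) : List Int × List Int :=
  let n := PySem.Int.floordiv (raw_data.length : Int) chunk_size
  let chunks := (PySem.List.pyRange 0 n 1).map
      (fun i => PySem.List.slice raw_data (some (i * chunk_size)) (some ((i + 1) * chunk_size)))
  let first := chunks.map (fun ch => (((PySem.List.index? chunks ch).getD 0 : Nat) : Int))
  let isfirst := (PySem.List.enumerate first).map (fun p => p.2 == p.1)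
  let root := first.map (fun f => ((PySem.List.count (PySem.List.slice isfirst none (some f)) true : Nat) : Int))
  let child_data := ((chunks.zip isfirst).filter (fun p => p.2)).flatMap (fun p => p.1)
  (root, child_data)

-- ===== PRECONDITION & SPEC =====
-- Pre_ excludes exactly the inputs where A raises: chunk_size = 0 (ZeroDivisionError)
-- and len(raw_data) % chunk_size ≠ 0 (AssertionError).
def Pre_compute_trie (raw_data : List Int) (chunk_size : Int) : Prop :=
  chunk_size ≠ 0 ∧ PySem.Int.mod (raw_data.length : Int) chunk_size = 0
instance (raw_data : List Int) (chunk_size : Int) : Decidable (Pre_compute_trie raw_data chunk_size) := by unfold Pre_compute_trie; infer_instance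

def pvWitness_compute_trie : List Int × Int := ([1, 2, 3, 1, 2, 3], 3)

def Spec_compute_trie (raw_data : List Int) (chunk_size : Int) (out : List Int × List Int) : Prop := out = compute_trie_alt raw_data chunk_size
instance (raw_data : List Int) (chunk_size : Int) (out : List Int × List Int) : Decidable (Spec_compute_trie raw_data chunk_size out) := by unfold Spec_compute_trie; infer_instance

-- ===== CLAIM (what is proved, stated in full; the proofs are below) =====
def Claim_equal_compute_trie : Prop := ∀ (raw_data : List Int) (chunk_size : Int), Dom_compute_trie raw_data chunk_size → Pre_compute_trie raw_data chunk_size → Spec_compute_trie raw_data chunk_size (compute_trie raw_data chunk_size)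

-- ===== LEMMAS AND PROOFS =====

def specIds (cs : List (List Int)) : List Int :=
  cs.map (fun ch => (((PySem.List.index? (PySem.Set.ofList cs) ch).getD 0 : Nat) : Int))
def specFlat (cs : List (List Int)) : List Int :=
  (PySem.Set.ofList cs).foldl (fun acc ch => acc ++ ch) []
def bFirst (cs : List (List Int)) : List Int :=
  cs.map (fun ch => (((PySem.List.index? cs ch).getD 0 : Nat) : Int))
def bIsFirst (cs : List (List Int)) : List Bool :=
  (PySem.List.enumerate (bFirst cs)).map (fun p => p.2 == p.1)
def bRoot (cs : List (List Int)) : List Int :=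
  (bFirst cs).map (fun f => ((PySem.List.count (PySem.List.slice (bIsFirst cs) none (some f)) true : Nat) : Int))
def bChild (cs : List (List Int)) : List Int :=
  ((cs.zip (bIsFirst cs)).filter (fun p => p.2)).flatMap (fun p => p.1)

theorem len_bFirst (cs : List (List Int)) : (bFirst cs).length = cs.length := by
  simp [bFirst]

theorem len_bIsFirst (cs : List (List Int)) : (bIsFirst cs).length = cs.length := by
  simp [bIsFirst, PySem.List.length_enumerate, len_bFirst]

theorem index?_lt (cs : List (List Int)) (ch : List Int) (k : Nat)
    (h : PySem.List.index? cs ch = some k) : k < cs.length := by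
  obtain ⟨hk, _, _⟩ := PySem.List.getElem_of_index?_eq_some h
  exact hk

theorem bFirst_append (cs : List (List Int)) (c : List Int) :
    bFirst (cs ++ [c]) = bFirst cs ++
      [if c ∈ cs then (((PySem.List.index? cs c).getD 0 : Nat) : Int) else (cs.length : Int)] := by
  unfold bFirst
  rw [List.map_append]
  congr 1
  · exact List.map_congr_left (fun ch hch => by rw [PySem.List.index?_append_of_mem _ hch])
  · simp only [List.map_cons, List.map_nil]
    by_cases hc : c ∈ cs
    · rw [PySem.List.index?_append_of_mem _ hc]; simp [hc]
    · rw [PySem.List.index?_append_singleton_self cs c hc]; simp [hc]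

theorem bIsFirst_append (cs : List (List Int)) (c : List Int) :
    bIsFirst (cs ++ [c]) = bIsFirst cs ++ [decide (c ∉ cs)] := by
  unfold bIsFirst
  rw [bFirst_append, PySem.List.enumerate_append, List.map_append]
  congr 1
  simp only [PySem.List.enumerate, len_bFirst]
  by_cases hc : c ∈ cs
  · obtain ⟨k, hk⟩ := Option.isSome_iff_exists.mp (((PySem.List.index?_isSome_iff cs c).mpr hc))
    have hklt := index?_lt cs c k hk
    simp only [hc, if_true, hk, Option.getD_some, List.map_cons, List.map_nil,
      not_true, decide_false]
    simp only [List.cons.injEq, and_true]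
    have : (k : Int) ≠ (cs.length : Int) := by exact_mod_cast Nat.ne_of_lt hklt
    simp [this]
  · simp [hc]

theorem B_main (cs : List (List Int)) :
    bChild cs = specFlat cs ∧
    PySem.List.count (bIsFirst cs) true = (PySem.Set.ofList cs).length ∧
    (∀ ch ∈ cs,
      PySem.List.count ((bIsFirst cs).take ((PySem.List.index? cs ch).getD 0)) true
        = (PySem.List.index? (PySem.Set.ofList cs) ch).getD 0) := by
  induction cs using List.reverseRecOn with
  | nil => refine ⟨rfl, rfl, ?_⟩; intro ch h; simp at h
  | append_singleton cs c ih =>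
    obtain ⟨ihC, ihN, ihK⟩ := ih
    have hlen := len_bIsFirst cs
    have hSmem : ∀ x, x ∈ PySem.Set.ofList cs ↔ x ∈ cs := fun x => PySem.Set.mem_ofList cs x
    rw [bIsFirst_append]
    by_cases hc : c ∈ cs
    · -- repeated chunk: nothing new
      have hset : PySem.Set.ofList (cs ++ [c]) = PySem.Set.ofList cs := by
        rw [PySem.Set.ofList_append_singleton, PySem.Set.add_of_mem ((hSmem c).mpr hc)]
      refine ⟨?_, ?_, ?_⟩
      · unfold bChild
        rw [bIsFirst_append, List.zip_append (by omega), List.filter_append,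
          List.flatMap_append]
        unfold specFlat
        rw [hset]
        have ihC' := ihC
        unfold bChild specFlat at ihC'
        simp [hc, ihC']
      · simp only [hc, not_true, decide_false, hset, PySem.List.count_eq, List.count_append]
        have h0 : List.count true [false] = 0 := by decide
        rw [h0, ← PySem.List.count_eq, ihN]
        omega
      · intro ch hch
        rcases List.mem_append.mp hch with hch | hch
        · rw [PySem.List.index?_append_of_mem _ hch, hset]
          obtain ⟨k, hk⟩ := Option.isSome_iff_exists.mp ((PySem.List.index?_isSome_iff cs ch).mpr hch)
          have hklt := index?_lt cs ch k hk
          rw [hk, Option.getD_some, List.take_append_of_le_length (by omega), ← ihK ch hch, hk]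
          rfl
        · have hch' : ch = c := by simpa using hch
          subst hch'
          rw [PySem.List.index?_append_of_mem _ hc, hset]
          obtain ⟨k, hk⟩ := Option.isSome_iff_exists.mp ((PySem.List.index?_isSome_iff cs ch).mpr hc)
          have hklt := index?_lt cs ch k hk
          rw [hk, Option.getD_some, List.take_append_of_le_length (by omega), ← ihK ch hc, hk]
          rfl
    · -- new chunk
      have hcS : c ∉ PySem.Set.ofList cs := fun h => hc ((hSmem c).mp h)
      have hset : PySem.Set.ofList (cs ++ [c]) = PySem.Set.ofList cs ++ [c] := by
        rw [PySem.Set.ofList_append_singleton, PySem.Set.add_of_not_mem hcS]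
      refine ⟨?_, ?_, ?_⟩
      · unfold bChild
        rw [bIsFirst_append, List.zip_append (by omega), List.filter_append,
          List.flatMap_append]
        unfold specFlat
        rw [hset, List.foldl_append]
        simp only [hc, not_false_iff, decide_true]
        have ihC' := ihC
        unfold bChild specFlat at ihC'
        simp [ihC']
      · simp only [hc, not_false_iff, decide_true, hset]
        rw [PySem.List.count_eq, List.count_append]
        simp [← PySem.List.count_eq, ihN]
      · intro ch hch
        rcases List.mem_append.mp hch with hch | hch
        · rw [PySem.List.index?_append_of_mem _ hch, hset,
            PySem.List.index?_append_of_mem _ ((hSmem ch).mpr hch)]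
          obtain ⟨k, hk⟩ := Option.isSome_iff_exists.mp ((PySem.List.index?_isSome_iff cs ch).mpr hch)
          have hklt := index?_lt cs ch k hk
          rw [hk, Option.getD_some, List.take_append_of_le_length (by omega), ← ihK ch hch, hk]
          rfl
        · have hch' : ch = c := by simpa using hch
          subst hch'
          rw [PySem.List.index?_append_singleton_self cs ch hc, hset,
            PySem.List.index?_append_singleton_self _ ch hcS]
          simp only [Option.getD_some]
          rw [List.take_append_of_le_length (by omega), ← ihN]
          have : (bIsFirst cs).take cs.length = bIsFirst cs := by
            rw [← hlen, List.take_length]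
          rw [this]

theorem B_root (cs : List (List Int)) : bRoot cs = specIds cs := by
  unfold bRoot specIds bFirst
  rw [List.map_map]
  apply List.map_congr_left
  intro ch hch
  obtain ⟨k, hk⟩ := Option.isSome_iff_exists.mp ((PySem.List.index?_isSome_iff cs ch).mpr hch)
  have h := (B_main cs).2.2 ch hch
  rw [hk] at h
  simp only [Function.comp, hk, Option.getD_some] at *
  rw [PySem.List.slice_to_natCast, h]

def stepA' (st : List Int × PySem.Dict (List Int) Int × List Int) (data : List Int) :
    List Int × PySem.Dict (List Int) Int × List Int :=
  if st.2.1.contains data then (st.1 ++ [st.2.1.getD data 0], st.2.1, st.2.2)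
  else (st.1 ++ [(st.2.1.insert data (st.2.1.size : Int)).getD data 0],
        st.2.1.insert data (st.2.1.size : Int), st.2.2 ++ data)

theorem A_inv (cs : List (List Int)) :
    (cs.foldl stepA' ([], PySem.Dict.empty, [])).1 = specIds cs ∧
    (cs.foldl stepA' ([], PySem.Dict.empty, [])).2.2 = specFlat cs ∧
    (∀ ch, (cs.foldl stepA' ([], PySem.Dict.empty, [])).2.1.getD ch 0
        = (((PySem.List.index? (PySem.Set.ofList cs) ch).getD 0 : Nat) : Int)) ∧
    (∀ ch, (cs.foldl stepA' ([], PySem.Dict.empty, [])).2.1.contains ch = decide (ch ∈ cs)) ∧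
    (cs.foldl stepA' ([], PySem.Dict.empty, [])).2.1.size = (PySem.Set.ofList cs).length := by
  induction cs using List.reverseRecOn with
  | nil =>
    refine ⟨rfl, rfl, ?_, ?_, rfl⟩ <;> intro ch <;>
      simp [PySem.Dict.getD_empty, PySem.Dict.contains_empty, PySem.List.index?]
  | append_singleton cs c ih =>
    obtain ⟨ihR, ihD, ihG, ihC, ihS⟩ := ih
    have hSmem : ∀ x, x ∈ PySem.Set.ofList cs ↔ x ∈ cs := fun x => PySem.Set.mem_ofList cs x
    rw [List.foldl_append, List.foldl_cons, List.foldl_nil]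
    set st := cs.foldl stepA' ([], PySem.Dict.empty, []) with hst
    by_cases hc : c ∈ cs
    · have hset : PySem.Set.ofList (cs ++ [c]) = PySem.Set.ofList cs := by
        rw [PySem.Set.ofList_append_singleton, PySem.Set.add_of_mem ((hSmem c).mpr hc)]
      have hcd : st.2.1.contains c = true := by rw [ihC]; simp [hc]
      unfold stepA'
      rw [hcd]
      simp only [if_true]
      refine ⟨?_, ?_, ?_, ?_, ?_⟩
      · unfold specIds
        rw [List.map_append, hset]
        have e1 : st.1 = List.map (fun ch => (((PySem.List.index? (PySem.Set.ofList cs) ch).getD 0 : Nat) : Int)) cs := ihR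
        have e2 : [st.2.1.getD c 0] = List.map (fun ch => (((PySem.List.index? (PySem.Set.ofList cs) ch).getD 0 : Nat) : Int)) [c] := by
          simp only [List.map_cons, List.map_nil]
          rw [ihG c]
        rw [e1, e2]
      · rw [ihD]; unfold specFlat; rw [hset]
      · intro ch; rw [ihG ch, hset]
      · intro ch
        rw [ihC ch]
        have : (ch ∈ cs ++ [c]) ↔ (ch ∈ cs) := by
          simp only [List.mem_append, List.mem_singleton]
          constructor
          · rintro (h | rfl); exact h; exact hc
          · exact Or.inl
        simp [this]
      · rw [ihS, hset]
    · have hcS : c ∉ PySem.Set.ofList cs := fun h => hc ((hSmem c).mp h)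
      have hset : PySem.Set.ofList (cs ++ [c]) = PySem.Set.ofList cs ++ [c] := by
        rw [PySem.Set.ofList_append_singleton, PySem.Set.add_of_not_mem hcS]
      have hcd : st.2.1.contains c = false := by rw [ihC]; simp [hc]
      unfold stepA'
      rw [hcd]
      simp only [Bool.false_eq_true, if_false]
      have hval : (st.2.1.insert c (st.2.1.size : Int)).getD c 0 = ((PySem.Set.ofList cs).length : Int) := by
        rw [PySem.Dict.getD_insert_self, ihS]
      refine ⟨?_, ?_, ?_, ?_, ?_⟩
      · unfold specIds
        rw [List.map_append, hset]
        have e1 : st.1 = List.map (fun ch => (((PySem.List.index? (PySem.Set.ofList cs ++ [c]) ch).getD 0 : Nat) : Int)) cs := by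
          rw [ihR]
          unfold specIds
          apply List.map_congr_left
          intro ch hch
          rw [PySem.List.index?_append_of_mem _ ((hSmem ch).mpr hch)]
        have e2 : [(st.2.1.insert c (st.2.1.size : Int)).getD c 0] = List.map (fun ch => (((PySem.List.index? (PySem.Set.ofList cs ++ [c]) ch).getD 0 : Nat) : Int)) [c] := by
          simp only [List.map_cons, List.map_nil]
          rw [hval, PySem.List.index?_append_singleton_self _ c hcS]
          simp
        rw [e1, e2]
      · rw [ihD]; unfold specFlat; rw [hset, List.foldl_append]; simp
      · intro ch
        rw [hset]
        by_cases hec : ch = c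
        · subst hec
          rw [hval, PySem.List.index?_append_singleton_self _ ch hcS]
          simp
        · rw [PySem.Dict.getD_insert_of_ne _ _ _ hec, ihG ch]
          by_cases hmem : ch ∈ PySem.Set.ofList cs
          · rw [PySem.List.index?_append_of_mem _ hmem]
          · rw [(PySem.List.index?_eq_none_iff _ _).mpr hmem,
              (PySem.List.index?_eq_none_iff _ _).mpr (by
                simp only [List.mem_append, List.mem_singleton]
                rintro (h | h); exact hmem h; exact hec h)]
      · intro ch
        rw [PySem.Dict.contains_insert, ihC ch]
        simp only [List.mem_append, List.mem_singleton]
        by_cases hec : ch = c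
        · subst hec; simp
        · simp [hec]
      · rw [PySem.Dict.size_insert, hcd, ihS, hset]
        simp

def chunksOf (raw_data : List Int) (chunk_size : Int) : List (List Int) :=
  (PySem.List.pyRange 0 (PySem.Int.floordiv (raw_data.length : Int) chunk_size) 1).map
    (fun i => PySem.List.slice raw_data (some (i * chunk_size)) (some ((i + 1) * chunk_size)))

theorem A_eq (raw_data : List Int) (chunk_size : Int) :
    compute_trie raw_data chunk_size =
      (specIds (chunksOf raw_data chunk_size), specFlat (chunksOf raw_data chunk_size)) := by
  have hstep : ctStepA raw_data chunk_size = fun st i =>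
      stepA' st (PySem.List.slice raw_data (some (i * chunk_size)) (some ((i + 1) * chunk_size))) := by
    funext st i
    simp only [ctStepA, stepA']
    by_cases h : st.2.1.contains (PySem.List.slice raw_data (some (i * chunk_size)) (some ((i + 1) * chunk_size))) <;>
      simp [h]
  unfold compute_trie
  rw [hstep]
  have hfold : (PySem.List.pyRange 0 (PySem.Int.floordiv (raw_data.length : Int) chunk_size) 1).foldl
      (fun st i => stepA' st (PySem.List.slice raw_data (some (i * chunk_size)) (some ((i + 1) * chunk_size))))
      ([], PySem.Dict.empty, []) = (chunksOf raw_data chunk_size).foldl stepA' ([], PySem.Dict.empty, []) := by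
    rw [chunksOf, List.foldl_map]
  simp only [hfold]
  obtain ⟨h1, h2, _, _, _⟩ := A_inv (chunksOf raw_data chunk_size)
  exact Prod.ext h1 h2

theorem B_eq (raw_data : List Int) (chunk_size : Int) :
    compute_trie_alt raw_data chunk_size =
      (specIds (chunksOf raw_data chunk_size), specFlat (chunksOf raw_data chunk_size)) := by
  have : compute_trie_alt raw_data chunk_size =
      (bRoot (chunksOf raw_data chunk_size), bChild (chunksOf raw_data chunk_size)) := rfl
  rw [this, B_root, (B_main (chunksOf raw_data chunk_size)).1]

-- ===== VERDICT (by name: the statement is the Claim_ definition above) =====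
theorem compute_trie_spec : Claim_equal_compute_trie := by
  intro raw_data chunk_size _ _
  unfold Spec_compute_trie
  rw [A_eq, B_eq]
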